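-- pv_equiv track=rewrite | github.com/openstack-archive/anvil | anvil/tests/test_tools.py | _extract_conflicts
-- ===== SOURCE A (Python) =====
-- def _extract_conflicts(stderr):
--     conflicts = {}
--     current_name = None
--     capturing = False
--     for line in stderr.splitlines():
--         if line.endswith(": incompatible requirements"):
--             capturing = False
--             current_name = line.split(":", 1)[0].lower().strip()
--             if current_name not in conflicts:
--                 conflicts[current_name] = []
--             continue
--         if line.startswith("Choosing") and current_name:
--             capturing = False
--             continue
--         if line.startswith("Conflicting") and current_name:
--             capturing = True
--             continue
--         if capturing and current_name and line.startswith("\t"):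
--             try:
--                 line = line.lstrip()
--                 _where, req = line.split(":", 1)
--                 req = req.strip()
--                 if req:
--                     conflicts[current_name].append(req)
--             except ValueError:
--                 pass
--     return conflicts
-- ===== SOURCE B (Python) =====
-- def _section_reqs(body):
--     reqs, cap = [], False
--     for line in body:
--         if line.startswith("Choosing"):
--             cap = False
--         elif line.startswith("Conflicting"):
--             cap = True
--         elif cap and line.startswith("\t"):
--             parts = line.lstrip().split(":", 1)
--             if len(parts) == 2:
--                 req = parts[1].strip()
--                 if req:
--                     reqs.append(req)
--     return reqs
--
--
-- def _extract_conflicts(stderr):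
--     # two-pass: cut the lines into header-delimited sections, then extract
--     # each section's requirements with a local flag walk
--     lines = stderr.splitlines()
--     conflicts = {}
--     i, n = 0, len(lines)
--     while i < n:
--         line = lines[i]
--         i += 1
--         if not line.endswith(": incompatible requirements"):
--             continue
--         name = line.split(":", 1)[0].lower().strip()
--         start = i
--         while i < n and not lines[i].endswith(": incompatible requirements"):
--             i += 1
--         reqs = _section_reqs(lines[start:i]) if name else []
--         conflicts.setdefault(name, []).extend(reqs)
--     return conflicts
-- ===== Notes on version B (the rewrite author's own statement) =====
-- stated objective: alternative
-- what changed: Replaces A's single flat loop carrying a cross-line (dict, current_name, capturing) state with a two-pass shape: an index walk that cuts the lines into header-delimited sections, then a per-section local flag walk extracting requirements (length check instead of try/except), merged into the dict per section via setdefault/extend.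
import Mathlib
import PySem

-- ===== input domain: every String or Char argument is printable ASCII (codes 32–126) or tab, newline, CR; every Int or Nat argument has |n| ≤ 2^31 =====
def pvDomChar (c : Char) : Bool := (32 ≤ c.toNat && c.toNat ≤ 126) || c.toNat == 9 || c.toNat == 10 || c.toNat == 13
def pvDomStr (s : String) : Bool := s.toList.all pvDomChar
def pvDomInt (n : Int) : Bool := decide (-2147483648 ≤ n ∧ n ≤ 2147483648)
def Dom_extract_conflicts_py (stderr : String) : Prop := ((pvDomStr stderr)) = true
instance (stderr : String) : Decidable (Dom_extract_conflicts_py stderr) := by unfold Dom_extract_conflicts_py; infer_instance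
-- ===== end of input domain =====

-- B replaces A's single flat loop (dict, current_name, capturing) with a two-pass shape:
-- cut the lines into header-delimited sections, then extract each section's requirements
-- with a local flag walk (objective: alternative decomposition, same cost).

-- helpers shared by both ports (each Python computes these the same way)
def pvIsHeader (line : String) : Bool := PySem.Str.endswith line ": incompatible requirements"

def pvNameOf (line : String) : String :=
  PySem.Str.strip (PySem.Str.lower (((PySem.Str.splitMax? line ":" 1).getD []).headD ""))

-- ===== PORT A =====
-- truthiness of `current_name` (None and "" are falsy)
def pvTruthy (cn : Option String) : Bool := decide (cn.getD "" ≠ "")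

-- A's try/except body: `_where, req = line.lstrip().split(":", 1); req = req.strip()`;
-- none = ValueError (no colon, so only one part) or empty req
def pvAParseReq (line : String) : Option String :=
  match PySem.Str.splitMax? (PySem.Str.lstrip line) ":" 1 with
  | some [_w, req0] =>
    let req := PySem.Str.strip req0
    if req ≠ "" then some req else none
  | _ => none

def pvAStep : (PySem.Dict String (List String) × Option String × Bool) → String →
    (PySem.Dict String (List String) × Option String × Bool)
  | (conflicts, cn, capturing), line =>
    if pvIsHeader line then
      let name := pvNameOf line
      ((if conflicts.contains name then conflicts else conflicts.insert name []), some name, false)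
    else if PySem.Str.startswith line "Choosing" && pvTruthy cn then
      (conflicts, cn, false)
    else if PySem.Str.startswith line "Conflicting" && pvTruthy cn then
      (conflicts, cn, true)
    else if capturing && pvTruthy cn && PySem.Str.startswith line "\t" then
      -- conflicts[current_name].append(req): the key is always present here, so modify is exact
      match pvAParseReq line with
      | some req => (conflicts.modify (cn.getD "") [] (· ++ [req]), cn, capturing)
      | none => (conflicts, cn, capturing)
    else (conflicts, cn, capturing)

def extract_conflicts_py (stderr : String) : List (String × List String) :=
  ((PySem.Str.splitlines stderr).foldl pvAStep (PySem.Dict.empty, none, false)).1.items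

-- ===== PORT B =====
-- B's `len(parts) == 2` check is the two-element pattern of the split result
def pvBParseReq (line : String) : Option String :=
  match (PySem.Str.splitMax? (PySem.Str.lstrip line) ":" 1).getD [] with
  | [_w, req0] =>
    let req := PySem.Str.strip req0
    if req ≠ "" then some req else none
  | _ => none

def pvSecReqStep : (List String × Bool) → String → (List String × Bool)
  | (reqs, cap), line =>
    if PySem.Str.startswith line "Choosing" then (reqs, false)
    else if PySem.Str.startswith line "Conflicting" then (reqs, true)
    else if cap && PySem.Str.startswith line "\t" then
      match pvBParseReq line with
      | some req => (reqs ++ [req], cap)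
      | none => (reqs, cap)
    else (reqs, cap)

def pvSectionReqs (body : List String) : List String :=
  (body.foldl pvSecReqStep ([], false)).1

def pvNotHeader (line : String) : Bool := !pvIsHeader line

-- outer while loop on the line index: fuel = number of unprocessed lines (i < n), so the
-- recursion is structural; skip to the next header, cut its section body (the inner while),
-- extract, merge via setdefault/extend (= modify with ++)
def pvBMain : Nat → PySem.Dict String (List String) → List String → PySem.Dict String (List String)
  | 0, conflicts, _ => conflicts
  | _ + 1, conflicts, [] => conflicts
  | fuel + 1, conflicts, l :: ls =>
    if pvIsHeader l then
      let name := pvNameOf l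
      let reqs := if name ≠ "" then pvSectionReqs (ls.takeWhile pvNotHeader) else []
      pvBMain fuel (conflicts.modify name [] (· ++ reqs)) (ls.dropWhile pvNotHeader)
    else pvBMain fuel conflicts ls

def extract_conflicts_py_alt (stderr : String) : List (String × List String) :=
  let lines := PySem.Str.splitlines stderr
  (pvBMain lines.length PySem.Dict.empty lines).items

-- ===== PRECONDITION & SPEC =====
def Spec_extract_conflicts_py (stderr : String) (out : List (String × List String)) : Prop := out = extract_conflicts_py_alt stderr
instance (stderr : String) (out : List (String × List String)) : Decidable (Spec_extract_conflicts_py stderr out) := by unfold Spec_extract_conflicts_py; infer_instance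

-- ===== CLAIM (what is proved, stated in full; the proofs are below) =====
def Claim_equal_extract_conflicts_py : Prop := ∀ (stderr : String), Dom_extract_conflicts_py stderr → Spec_extract_conflicts_py stderr (extract_conflicts_py stderr)

-- ===== LEMMAS AND PROOFS =====

-- the two parsers agree
lemma pvParse_eq (line : String) : pvBParseReq line = pvAParseReq line := by
  unfold pvAParseReq pvBParseReq
  rcases h : PySem.Str.splitMax? (PySem.Str.lstrip line) ":" 1 with _ | ⟨_ | ⟨a, _ | ⟨b, _ | _⟩⟩⟩ <;> simp

-- proof-only accumulator: A's per-requirement appends, folded over a list of requirements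
def pvApply (d : PySem.Dict String (List String)) (name : String) (acc : List String) :
    PySem.Dict String (List String) :=
  acc.foldl (fun dd r => dd.modify name [] (· ++ [r])) d

lemma pvModify_modify (d : PySem.Dict String (List String)) (k : String)
    (f g : List String → List String) :
    (d.modify k [] f).modify k [] g = d.modify k [] (fun v => g (f v)) := by
  simp [PySem.Dict.modify, PySem.Dict.getD_insert_self, PySem.Dict.insert_insert_self]

lemma pvApply_modify (acc : List String) (d : PySem.Dict String (List String)) (k : String)
    (rs : List String) :
    pvApply (d.modify k [] (· ++ rs)) k acc = d.modify k [] (· ++ (rs ++ acc)) := by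
  induction acc generalizing rs with
  | nil => simp [pvApply]
  | cons r acc ih =>
    show pvApply ((d.modify k [] (· ++ rs)).modify k [] (· ++ [r])) k acc = _
    rw [pvModify_modify]
    have : (fun v => (v ++ rs) ++ [r]) = (fun v : List String => v ++ (rs ++ [r])) := by
      funext v; simp
    rw [this, ih]
    simp

lemma pvInsert_getD_self (d : PySem.Dict String (List String)) (k : String)
    (hnd : d.keys.Nodup) (hc : d.contains k = true) : d.insert k (d.getD k []) = d := by
  apply PySem.Dict.ext
  have hmap : List.map (fun p => if (p.1 == k) = true then (k, d.getD k []) else p) d.items =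
      List.map id d.items := by
    refine List.map_congr_left (fun p hp => ?_)
    by_cases hk : (p.1 == k) = true
    · have h1 : p.1 = k := eq_of_beq hk
      have hp' : (k, p.2) ∈ d.items := by rw [← h1]; exact hp
      have h2 : d.getD k [] = p.2 := PySem.Dict.getD_of_mem_items d hp' hnd []
      rw [if_pos hk, h2, ← h1]
      rfl
    · simp [hk]
  rw [PySem.Dict.items_insert_of_contains d _ hc, hmap, List.map_id]

lemma pvModify_nil (d : PySem.Dict String (List String)) (k : String) (hnd : d.keys.Nodup) :
    d.modify k [] (· ++ []) = if d.contains k then d else d.insert k [] := by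
  by_cases hc : d.contains k = true
  · simp only [hc, if_pos]
    show d.insert k (d.getD k [] ++ []) = d
    rw [List.append_nil]
    exact pvInsert_getD_self d k hnd hc
  · simp only [hc]
    show d.insert k (d.getD k [] ++ []) = d.insert k []
    rw [PySem.Dict.getD_of_not_contains d [] (by simpa using hc)]
    simp

-- nodup keys survive a modify
lemma pvNodup_modify (d : PySem.Dict String (List String)) (k : String)
    (f : List String → List String) (hnd : d.keys.Nodup) : (d.modify k [] f).keys.Nodup := by
  show (d.insert k (f (d.getD k []))).keys.Nodup
  exact PySem.Dict.nodup_keys_insert d k _ hnd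

-- A's step on a non-header line with falsy current_name does nothing
lemma pvAStep_skip (d : PySem.Dict String (List String)) (cn : Option String) (cap : Bool)
    (l : String) (hh : pvIsHeader l = false) (hf : pvTruthy cn = false) :
    pvAStep (d, cn, cap) l = (d, cn, cap) := by
  simp [pvAStep, hh, hf]

lemma pvSkipRun (body : List String) (h : ∀ l ∈ body, pvIsHeader l = false)
    (d : PySem.Dict String (List String)) (cn : Option String) (cap : Bool)
    (hf : pvTruthy cn = false) : body.foldl pvAStep (d, cn, cap) = (d, cn, cap) := by
  induction body with
  | nil => rfl
  | cons l body ih =>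
    rw [List.foldl_cons, pvAStep_skip d cn cap l (h l (by simp)) hf]
    exact ih (fun x hx => h x (by simp [hx]))

-- inside a section: A's flag-driven captures equal B's local extraction folded onto the dict
lemma pvBodyRun (body : List String) (h : ∀ l ∈ body, pvIsHeader l = false)
    (d : PySem.Dict String (List String)) (name : String) (ht : pvTruthy (some name) = true) :
    ∀ (acc : List String) (cap : Bool),
      body.foldl pvAStep (pvApply d name acc, some name, cap) =
        (pvApply d name (body.foldl pvSecReqStep (acc, cap)).1, some name,
          (body.foldl pvSecReqStep (acc, cap)).2) := by
  induction body with
  | nil => intro acc cap; rfl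
  | cons l body ih =>
    intro acc cap
    have hh : pvIsHeader l = false := h l (by simp)
    have h' : ∀ x ∈ body, pvIsHeader x = false := fun x hx => h x (by simp [hx])
    rw [List.foldl_cons, List.foldl_cons]
    by_cases hch : PySem.Str.startswith l "Choosing" = true
    · simp at hch
      have ha : pvAStep (pvApply d name acc, some name, cap) l = (pvApply d name acc, some name, false) := by
        simp [pvAStep, hh, hch, ht]
      have hb : pvSecReqStep (acc, cap) l = (acc, false) := by simp [pvSecReqStep, hch]
      rw [ha, hb]; exact ih h' acc false
    · simp at hch
      by_cases hcf : PySem.Str.startswith l "Conflicting" = true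
      · simp at hcf
        have ha : pvAStep (pvApply d name acc, some name, cap) l = (pvApply d name acc, some name, true) := by
          simp [pvAStep, hh, hch, hcf, ht]
        have hb : pvSecReqStep (acc, cap) l = (acc, true) := by simp [pvSecReqStep, hch, hcf]
        rw [ha, hb]; exact ih h' acc true
      · simp at hcf
        by_cases hcapb : cap = true
        · by_cases htab : PySem.Str.startswith l "\t" = true
          · simp at htab
            rcases hreq : pvAParseReq l with _ | req
            · have ha : pvAStep (pvApply d name acc, some name, cap) l = (pvApply d name acc, some name, cap) := by
                simp [pvAStep, hh, hch, hcf, ht, hcapb, htab, hreq]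
              have hb : pvSecReqStep (acc, cap) l = (acc, cap) := by
                simp [pvSecReqStep, hch, hcf, hcapb, htab, pvParse_eq, hreq]
              rw [ha, hb]; exact ih h' acc cap
            · have ha : pvAStep (pvApply d name acc, some name, cap) l =
                  (pvApply d name (acc ++ [req]), some name, cap) := by
                simp [pvAStep, hh, hch, hcf, ht, hcapb, htab, hreq, pvApply, List.foldl_append]
              have hb : pvSecReqStep (acc, cap) l = (acc ++ [req], cap) := by
                simp [pvSecReqStep, hch, hcf, hcapb, htab, pvParse_eq, hreq]
              rw [ha, hb]; exact ih h' (acc ++ [req]) cap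
          · simp at htab
            have ha : pvAStep (pvApply d name acc, some name, cap) l = (pvApply d name acc, some name, cap) := by
              simp [pvAStep, hh, hch, hcf, ht, hcapb, htab]
            have hb : pvSecReqStep (acc, cap) l = (acc, cap) := by
              simp [pvSecReqStep, hch, hcf, hcapb, htab]
            rw [ha, hb]; exact ih h' acc cap
        · simp at hcapb
          have ha : pvAStep (pvApply d name acc, some name, cap) l = (pvApply d name acc, some name, cap) := by
            simp [pvAStep, hh, hch, hcf, ht, hcapb]
          have hb : pvSecReqStep (acc, cap) l = (acc, cap) := by
            simp [pvSecReqStep, hch, hcf, hcapb]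
          rw [ha, hb]; exact ih h' acc cap

-- the first line not skipped by dropWhile is a header
lemma pvDropHead (ls : List String) :
    ∀ l ∈ (ls.dropWhile pvNotHeader).head?, pvIsHeader l = true := by
  induction ls with
  | nil => simp
  | cons a ls ih =>
    by_cases ha : pvNotHeader a = true
    · rw [List.dropWhile_cons_of_pos ha]; exact ih
    · rw [List.dropWhile_cons_of_neg ha]
      intro l hl
      simp only [List.head?_cons, Option.mem_def, Option.some.injEq] at hl
      subst hl
      simpa [pvNotHeader] using ha

-- boundary invariant: either no section is open, or we stand at a header (or the end)
def pvOK (cn : Option String) (ls : List String) : Prop :=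
  pvTruthy cn = false ∨ ∀ l ∈ ls.head?, pvIsHeader l = true

-- main invariant: from any boundary state, A's remaining flat loop computes B's section walk
lemma pvMain (n : Nat) : ∀ (ls : List String), ls.length ≤ n →
    ∀ (d : PySem.Dict String (List String)) (cn : Option String) (cap : Bool),
      pvOK cn ls → d.keys.Nodup →
      (ls.foldl pvAStep (d, cn, cap)).1 = pvBMain n d ls := by
  induction n with
  | zero =>
    intro ls hlen d cn cap _ _
    have : ls = [] := List.eq_nil_of_length_eq_zero (Nat.le_zero.mp hlen)
    subst this; simp [pvBMain]
  | succ n ih =>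
    intro ls hlen d cn cap hok hnd
    cases ls with
    | nil => simp [pvBMain]
    | cons l ls' =>
      have hlen' : ls'.length ≤ n := by simpa using hlen
      by_cases hh : pvIsHeader l = true
      · -- header line: open the section pvNameOf l
        have hstep : pvAStep (d, cn, cap) l =
            ((if d.contains (pvNameOf l) then d else d.insert (pvNameOf l) []), some (pvNameOf l), false) := by
          simp [pvAStep, hh]
        have hsplit : ls' = ls'.takeWhile pvNotHeader ++ ls'.dropWhile pvNotHeader :=
          (List.takeWhile_append_dropWhile).symm
        have hbodyNH : ∀ x ∈ ls'.takeWhile pvNotHeader, pvIsHeader x = false := by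
          intro x hx
          have := List.mem_takeWhile_imp hx
          simpa [pvNotHeader] using this
        have hrestLen : (ls'.dropWhile pvNotHeader).length ≤ n :=
          Nat.le_trans (List.length_dropWhile_le _ _) hlen'
        have hrestOK : ∀ (cn' : Option String), pvOK cn' (ls'.dropWhile pvNotHeader) :=
          fun _ => Or.inr (pvDropHead ls')
        have hens : d.modify (pvNameOf l) [] (· ++ []) =
            if d.contains (pvNameOf l) then d else d.insert (pvNameOf l) [] :=
          pvModify_nil d (pvNameOf l) hnd
        have hndE : (if d.contains (pvNameOf l) then d else d.insert (pvNameOf l) []).keys.Nodup := by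
          split
          · exact hnd
          · exact PySem.Dict.nodup_keys_insert d _ _ hnd
        have hBeq : pvBMain (n + 1) d (l :: ls') =
            pvBMain n (d.modify (pvNameOf l) []
              (· ++ (if pvNameOf l ≠ "" then pvSectionReqs (ls'.takeWhile pvNotHeader) else [])))
              (ls'.dropWhile pvNotHeader) := by
          rw [pvBMain]; simp only [hh, if_pos]
        rw [List.foldl_cons, hstep, hBeq]
        conv_lhs => rw [hsplit, List.foldl_append]
        by_cases hname : pvNameOf l = ""
        · -- empty name: the whole section body is skipped by both
          have hft : pvTruthy (some (pvNameOf l)) = false := by simp [pvTruthy, hname]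
          rw [pvSkipRun _ hbodyNH _ _ _ hft]
          rw [ih _ hrestLen _ (some (pvNameOf l)) false (hrestOK _) hndE]
          have : (if pvNameOf l ≠ "" then pvSectionReqs (ls'.takeWhile pvNotHeader) else []) = [] := by
            simp [hname]
          rw [this, hens]
        · -- real section: run pvBodyRun over the body, then recurse at the next boundary
          have hft : pvTruthy (some (pvNameOf l)) = true := by simp [pvTruthy, hname]
          rw [← hens]
          have h0 : d.modify (pvNameOf l) [] (· ++ []) =
              pvApply (d.modify (pvNameOf l) [] (· ++ [])) (pvNameOf l) [] := rfl
          rw [h0, pvBodyRun _ hbodyNH _ _ hft [] false, pvApply_modify, List.nil_append]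
          rw [ih _ hrestLen _ (some (pvNameOf l)) _ (hrestOK _)
            (pvNodup_modify d _ _ hnd)]
          have : (if pvNameOf l ≠ "" then pvSectionReqs (ls'.takeWhile pvNotHeader) else []) =
              (List.foldl pvSecReqStep ([], false) (ls'.takeWhile pvNotHeader)).1 := by
            simp [hname, pvSectionReqs]
          rw [this]
      · -- non-header line before the next section: both sides skip it
        have hf : pvTruthy cn = false := by
          rcases hok with hf | hhd
          · exact hf
          · exact absurd (hhd l (by simp)) (by simpa using hh)
        rw [List.foldl_cons, pvAStep_skip d cn cap l (by simpa using hh) hf]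
        rw [ih _ hlen' _ _ _ (Or.inl hf) hnd]
        rw [pvBMain]
        simp only [hh, Bool.false_eq_true, if_false]

-- ===== VERDICT (by name: the statement is the Claim_ definition above) =====
theorem extract_conflicts_py_spec : Claim_equal_extract_conflicts_py := by
  unfold Claim_equal_extract_conflicts_py
  intro stderr _
  unfold Spec_extract_conflicts_py extract_conflicts_py extract_conflicts_py_alt
  congr 1
  exact pvMain (PySem.Str.splitlines stderr).length _ (Nat.le_refl _) _ none false
    (Or.inl (by decide)) (PySem.Dict.nodup_keys_empty)
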